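-- pv_equiv track=rewrite | github.com/zzarbttoo/algorithm | baekjun/dp/2579.py | solution
-- ===== SOURCE A (Python) =====
-- def solution(n, stair_array):
--
--     count_array = [0 for _ in range(n)]
--
--     if n == 1:
--         return stair_array[0]
--
--     if n == 2:
--         return stair_array[0] + stair_array[1]
--
--     count_array[0] = stair_array[0]
--     count_array[1] = stair_array[0] + stair_array[1]
--     count_array[2] = max((stair_array[0] + stair_array[2]), (stair_array[1] + stair_array[2]))
--
--     for i, _ in enumerate(count_array):
--         if i == 0 or i==1 or i==2:
--             continue
--         count_array[i] = max((count_array[i-3] + stair_array[i-1] + stair_array[i]), (count_array[i-2] + stair_array[i]))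
--
--     return count_array[n-1]
-- ===== SOURCE B (Python) =====
-- def solution(n, stair_array):
--     # Top-down, demand-driven memoized evaluation of the staircase recurrence,
--     # driven by an explicit expand/combine work stack (only subproblems reachable
--     # from step n-1 are ever computed; no full bottom-up table fill).
--     if n == 1:
--         return stair_array[0]
--     if n == 2:
--         return stair_array[0] + stair_array[1]
--     memo = {}
--     stack = [('expand', n - 1)]
--     while stack:
--         tag, i = stack.pop()
--         if tag == 'expand':
--             if i in memo:
--                 continue
--             if i <= 2:
--                 if i == 0:
--                     memo[0] = stair_array[0]
--                 elif i == 1: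
--                     memo[1] = stair_array[0] + stair_array[1]
--                 else:
--                     memo[2] = max(stair_array[0] + stair_array[2],
--                                   stair_array[1] + stair_array[2])
--             else:
--                 stack.append(('combine', i))
--                 stack.append(('expand', i - 3))
--                 stack.append(('expand', i - 2))
--         else:
--             memo[i] = max(memo[i - 3] + stair_array[i - 1] + stair_array[i],
--                           memo[i - 2] + stair_array[i])
--     return memo[n - 1]
-- ===== Notes on version B (the rewrite author's own statement) =====
-- stated objective: alternative
-- what changed: Replaces A's bottom-up fill of a size-n DP table by top-down demand-driven memoization: an explicit expand/combine work stack with a dict computes only the subproblems reachable from step n-1 (index n-2 is never evaluated), instead of filling every table slot in index order.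
import Mathlib
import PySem

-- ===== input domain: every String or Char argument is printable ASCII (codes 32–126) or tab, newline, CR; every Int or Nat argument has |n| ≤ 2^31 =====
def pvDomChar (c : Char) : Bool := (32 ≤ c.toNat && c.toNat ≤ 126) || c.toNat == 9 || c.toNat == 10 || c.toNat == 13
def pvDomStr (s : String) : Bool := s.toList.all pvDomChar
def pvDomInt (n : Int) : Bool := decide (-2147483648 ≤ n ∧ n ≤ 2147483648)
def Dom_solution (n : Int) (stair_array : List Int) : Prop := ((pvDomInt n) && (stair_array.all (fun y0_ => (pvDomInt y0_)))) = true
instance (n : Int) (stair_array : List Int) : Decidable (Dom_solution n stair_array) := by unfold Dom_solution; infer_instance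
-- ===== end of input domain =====

-- B replaces A's bottom-up table fill with top-down demand-driven memoization via an
-- explicit expand/combine work stack and a dict; objective: alternative, same cost.

-- ===== PORT A =====
-- one fold step of A's 'for i, _ in enumerate(count_array)' loop
def solStep (stair_array : List Int) (c : List Int) (i : Nat) : List Int :=
  if i = 0 ∨ i = 1 ∨ i = 2 then c
  else c.set i (max (c.getD (i-3) 0 + stair_array.getD (i-1) 0 + stair_array.getD i 0)
                    (c.getD (i-2) 0 + stair_array.getD i 0))

def solution (n : Int) (stair_array : List Int) : Int :=
  let count0 := List.replicate n.toNat (0 : Int)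
  if n = 1 then stair_array.getD 0 0
  else if n = 2 then stair_array.getD 0 0 + stair_array.getD 1 0
  else
    let c1 := count0.set 0 (stair_array.getD 0 0)
    let c2 := c1.set 1 (stair_array.getD 0 0 + stair_array.getD 1 0)
    let c3 := c2.set 2 (max (stair_array.getD 0 0 + stair_array.getD 2 0)
                            (stair_array.getD 1 0 + stair_array.getD 2 0))
    let cf := (List.range c3.length).foldl (solStep stair_array) c3
    cf.getD (n-1).toNat 0

-- ===== PORT B =====
-- Source B's stack frames: ('expand', i) / ('combine', i)
inductive PvFrame : Type
  | expand : Nat → PvFrame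
  | combine : Nat → PvFrame
deriving DecidableEq, Repr

-- termination measure for the while loop: expand i weighs 2^i, combine weighs 1
def pvWt : PvFrame → Nat
  | .expand i => 2 ^ i
  | .combine _ => 1

def pvMeas (st : List PvFrame) : Nat := (st.map pvWt).sum

theorem pvMeas_push (i : Nat) (rest : List PvFrame) (h : ¬ i ≤ 2) :
    pvMeas (.expand (i-2) :: .expand (i-3) :: .combine i :: rest) <
    pvMeas (.expand i :: rest) := by
  simp only [pvMeas, List.map, List.sum_cons, pvWt]
  have h3 : 3 ≤ i := by omega
  have e : i = (i - 3) + 3 := by omega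
  have : 2 ^ (i-2) + 2 ^ (i-3) + 1 < 2 ^ i := by
    have h1 : 2 ^ (i-2) = 2 ^ (i-3) * 2 := by
      rw [show i - 2 = (i-3) + 1 by omega, pow_succ]
    have h2 : 2 ^ i = 2 ^ (i-3) * 8 := by
      rw [e, pow_add]; norm_num
    have hp : 1 ≤ 2 ^ (i-3) := Nat.one_le_two_pow
    omega
  omega

-- Source B's while loop: process the stack until empty, returning the memo dict
def pvRun (stair_array : List Int) (st : List PvFrame) (memo : PySem.Dict Int Int) :
    PySem.Dict Int Int :=
  match st with
  | [] => memo
  | .expand i :: rest =>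
      if memo.contains (i : Int) then pvRun stair_array rest memo
      else if h : i ≤ 2 then
        if i = 0 then pvRun stair_array rest (memo.insert 0 (stair_array.getD 0 0))
        else if i = 1 then
          pvRun stair_array rest (memo.insert 1 (stair_array.getD 0 0 + stair_array.getD 1 0))
        else
          pvRun stair_array rest (memo.insert 2 (max (stair_array.getD 0 0 + stair_array.getD 2 0)
                                                     (stair_array.getD 1 0 + stair_array.getD 2 0)))
      else pvRun stair_array (.expand (i-2) :: .expand (i-3) :: .combine i :: rest) memo
  | .combine i :: rest =>
      pvRun stair_array rest
        (memo.insert (i : Int)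
          (max (memo.getD ((i-3 : Nat) : Int) 0 + stair_array.getD (i-1) 0 + stair_array.getD i 0)
               (memo.getD ((i-2 : Nat) : Int) 0 + stair_array.getD i 0)))
termination_by pvMeas st
decreasing_by
  all_goals first
    | exact pvMeas_push _ _ h
    | simp [pvMeas, pvWt]

def solution_alt (n : Int) (stair_array : List Int) : Int :=
  if n = 1 then stair_array.getD 0 0
  else if n = 2 then stair_array.getD 0 0 + stair_array.getD 1 0
  else
    (pvRun stair_array [.expand (n-1).toNat] PySem.Dict.empty).getD (n-1) 0

-- ===== PRECONDITION & SPEC =====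
-- Pre_ excludes exactly the inputs where A raises IndexError: n < 1 (the assignments
-- count_array[0] = … hit an empty/short table) or n > len(stair_array) (stair reads out of range).
def Pre_solution (n : Int) (stair_array : List Int) : Prop :=
  1 ≤ n ∧ n ≤ stair_array.length
instance (n : Int) (stair_array : List Int) : Decidable (Pre_solution n stair_array) := by
  unfold Pre_solution; infer_instance

def pvWitness_solution : Int × List Int := (6, [10, 20, 15, 25, 10, 20])

def Spec_solution (n : Int) (stair_array : List Int) (out : Int) : Prop := out = solution_alt n stair_array
instance (n : Int) (stair_array : List Int) (out : Int) : Decidable (Spec_solution n stair_array out) := by unfold Spec_solution; infer_instance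

-- ===== CLAIM (what is proved, stated in full; the proofs are below) =====
def Claim_equal_solution : Prop := ∀ (n : Int) (stair_array : List Int), Dom_solution n stair_array → Pre_solution n stair_array → Spec_solution n stair_array (solution n stair_array)

-- ===== LEMMAS AND PROOFS =====

-- the common recurrence both programs compute: the best score ending exactly at step i
def bestFn (stair_array : List Int) : Nat → Int
  | 0 => stair_array.getD 0 0
  | 1 => stair_array.getD 0 0 + stair_array.getD 1 0
  | 2 => max (stair_array.getD 0 0 + stair_array.getD 2 0)
             (stair_array.getD 1 0 + stair_array.getD 2 0)
  | (k+3) => max (bestFn stair_array k + stair_array.getD (k+2) 0 + stair_array.getD (k+3) 0)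
                 (bestFn stair_array (k+1) + stair_array.getD (k+3) 0)

-- getD of set, in range, same index
theorem getD_set_self (c : List Int) (i : Nat) (v : Int) (h : i < c.length) :
    (c.set i v).getD i 0 = v := by
  simp [List.getD, h]

-- getD of set at a different index
theorem getD_set_ne (c : List Int) (i j : Nat) (v : Int) (h : i ≠ j) :
    (c.set i v).getD j 0 = c.getD j 0 := by
  simp [List.getD, h]

-- A-side loop invariant: folding A's step over range m turns every processed (or base)
-- in-range entry of the table into bestFn.
theorem loop_inv (stair : List Int) (c : List Int)
    (h0 : ∀ i, i < 3 → i < c.length → c.getD i 0 = bestFn stair i) (m : Nat) :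
    ((List.range m).foldl (solStep stair) c).length = c.length ∧
    ∀ i, i < c.length → (i < 3 ∨ i < m) →
      ((List.range m).foldl (solStep stair) c).getD i 0 = bestFn stair i := by
  induction m with
  | zero =>
      refine ⟨rfl, ?_⟩
      intro i hi h3
      exact h0 i (by omega) hi
  | succ m ih =>
      obtain ⟨hlen, hval⟩ := ih
      rw [List.range_succ, List.foldl_append]
      set d := (List.range m).foldl (solStep stair) c with hd
      simp only [List.foldl_cons, List.foldl_nil]
      by_cases hm3 : m = 0 ∨ m = 1 ∨ m = 2
      · have : solStep stair d m = d := by simp [solStep, hm3]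
        rw [this]
        exact ⟨hlen, fun i hi h3 => hval i hi (by omega)⟩
      · have hm : 3 ≤ m := by omega
        have hstep : solStep stair d m =
            d.set m (max (d.getD (m-3) 0 + stair.getD (m-1) 0 + stair.getD m 0)
                         (d.getD (m-2) 0 + stair.getD m 0)) := by
          simp [solStep, hm3]
        rw [hstep]
        constructor
        · simp [hlen]
        · intro i hi h3
          by_cases him : i = m
          · subst him
            have hiL : i < d.length := by omega
            rw [getD_set_self _ _ _ hiL]
            have e3 : d.getD (i-3) 0 = bestFn stair (i-3) :=
              hval _ (by omega) (by omega)
            have e2 : d.getD (i-2) 0 = bestFn stair (i-2) :=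
              hval _ (by omega) (by omega)
            rw [e3, e2]
            obtain ⟨k, rfl⟩ : ∃ k, i = k + 3 := ⟨i - 3, by omega⟩
            have h1 : k + 3 - 3 = k := by omega
            have h2 : k + 3 - 2 = k + 1 := by omega
            have h3' : k + 3 - 1 = k + 2 := by omega
            rw [h1, h2, h3']
            rfl
          · rw [getD_set_ne _ _ _ _ (fun h => him h.symm)]
            exact hval i hi (by omega)

-- base entries of A's initialized table agree with bestFn
theorem base_entries (stair : List Int) (L : Nat) (hL : 3 ≤ L) :
    ∀ i, i < 3 →
      i < ((((List.replicate L (0:Int)).set 0 (stair.getD 0 0)).set 1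
              (stair.getD 0 0 + stair.getD 1 0)).set 2
              (max (stair.getD 0 0 + stair.getD 2 0) (stair.getD 1 0 + stair.getD 2 0))).length →
      ((((List.replicate L (0:Int)).set 0 (stair.getD 0 0)).set 1
              (stair.getD 0 0 + stair.getD 1 0)).set 2
              (max (stair.getD 0 0 + stair.getD 2 0) (stair.getD 1 0 + stair.getD 2 0))).getD i 0
        = bestFn stair i := by
  intro i hi _
  have hlen : (List.replicate L (0:Int)).length = L := by simp
  interval_cases i
  · rw [getD_set_ne _ _ _ _ (by omega), getD_set_ne _ _ _ _ (by omega),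
        getD_set_self _ _ _ (by omega)]
    rfl
  · rw [getD_set_ne _ _ _ _ (by omega), getD_set_self _ _ _ (by simp; omega)]
    rfl
  · rw [getD_set_self _ _ _ (by simp; omega)]
    rfl

-- ----- B-side lemmas -----

-- step lemmas for pvRun (the while loop, one iteration at a time)
theorem pvRun_nil (stair : List Int) (memo : PySem.Dict Int Int) :
    pvRun stair [] memo = memo := by
  rw [pvRun]

theorem pvRun_expand_mem (stair : List Int) (i : Nat) (rest : List PvFrame)
    (memo : PySem.Dict Int Int) (h : memo.contains (i : Int) = true) :
    pvRun stair (.expand i :: rest) memo = pvRun stair rest memo := by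
  rw [pvRun]; simp [h]

theorem pvRun_expand_base (stair : List Int) (i : Nat) (rest : List PvFrame)
    (memo : PySem.Dict Int Int) (h : memo.contains (i : Int) = false) (hi : i ≤ 2) :
    pvRun stair (.expand i :: rest) memo =
      pvRun stair rest (memo.insert (i : Int) (bestFn stair i)) := by
  interval_cases i <;> (rw [pvRun]; norm_num at h ⊢; simp [h, bestFn])

theorem pvRun_expand_push (stair : List Int) (i : Nat) (rest : List PvFrame)
    (memo : PySem.Dict Int Int) (h : memo.contains (i : Int) = false) (hi : ¬ i ≤ 2) :
    pvRun stair (.expand i :: rest) memo =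
      pvRun stair (.expand (i-2) :: .expand (i-3) :: .combine i :: rest) memo := by
  rw [pvRun]; simp [h, hi]

theorem pvRun_combine (stair : List Int) (i : Nat) (rest : List PvFrame)
    (memo : PySem.Dict Int Int) :
    pvRun stair (.combine i :: rest) memo =
      pvRun stair rest
        (memo.insert (i : Int)
          (max (memo.getD ((i-3 : Nat) : Int) 0 + stair.getD (i-1) 0 + stair.getD i 0)
               (memo.getD ((i-2 : Nat) : Int) 0 + stair.getD i 0))) := by
  rw [pvRun]

-- running the loop on st1 ++ st2 first consumes st1 entirely, then st2
theorem pvRun_append (stair : List Int) :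
    ∀ (m : Nat) (st1 st2 : List PvFrame) (memo : PySem.Dict Int Int), pvMeas st1 ≤ m →
      pvRun stair (st1 ++ st2) memo = pvRun stair st2 (pvRun stair st1 memo) := by
  intro m
  induction m with
  | zero =>
      intro st1 st2 memo hm
      cases st1 with
      | nil => simp [pvRun_nil]
      | cons f rest =>
          exfalso
          cases f with
          | expand i => simp [pvMeas, pvWt] at hm
          | combine i => simp [pvMeas, pvWt] at hm
  | succ m ih =>
      intro st1 st2 memo hm
      cases st1 with
      | nil => simp [pvRun_nil]
      | cons f rest =>
          cases f with
          | expand i =>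
              have hw : 1 ≤ 2 ^ i := Nat.one_le_two_pow
              by_cases hc : memo.contains (i : Int)
              · rw [List.cons_append, pvRun_expand_mem _ _ _ _ hc,
                    pvRun_expand_mem _ _ _ _ hc]
                exact ih rest st2 memo (by simp [pvMeas, pvWt] at hm ⊢; omega)
              · have hc' : memo.contains (i : Int) = false := by
                  exact Bool.not_eq_true _ ▸ (by simpa using hc)
                by_cases hi : i ≤ 2
                · rw [List.cons_append, pvRun_expand_base _ _ _ _ hc' hi,
                      pvRun_expand_base _ _ _ _ hc' hi]
                  exact ih rest st2 _ (by simp [pvMeas, pvWt] at hm ⊢; omega)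
                · rw [List.cons_append, pvRun_expand_push _ _ _ _ hc' hi,
                      pvRun_expand_push _ _ _ _ hc' hi]
                  have hlt := pvMeas_push i rest hi
                  have : pvMeas (.expand (i-2) :: .expand (i-3) :: .combine i :: rest) ≤ m := by
                    simp [pvMeas, pvWt] at hlt hm ⊢; omega
                  exact ih _ st2 memo this
          | combine i =>
              rw [List.cons_append, pvRun_combine, pvRun_combine]
              exact ih rest st2 _ (by simp [pvMeas, pvWt] at hm ⊢; omega)

-- memo invariant: every stored value is bestFn of its (natural-number) key
def GoodMemo (stair : List Int) (memo : PySem.Dict Int Int) : Prop :=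
  ∀ j : Nat, memo.contains ((j : Nat) : Int) = true → memo.getD ((j : Nat) : Int) 0 = bestFn stair j

theorem goodMemo_insert (stair : List Int) (memo : PySem.Dict Int Int) (i : Nat)
    (hg : GoodMemo stair memo) (v : Int) (hvv : v = bestFn stair i) :
    GoodMemo stair (memo.insert ((i : Nat) : Int) v) := by
  intro j hj
  rw [PySem.Dict.getD_insert]
  by_cases hji : ((j : Nat) : Int) = ((i : Nat) : Int)
  · simp [hji, hvv]
    have : j = i := by exact_mod_cast hji
    rw [this]
  · simp [hji]
    apply hg
    rw [PySem.Dict.contains_insert] at hj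
    simpa [hji] using hj

-- evaluating one expand frame: memo stays good, grows monotonically, and ends up containing i
theorem expand_correct (stair : List Int) :
    ∀ (i : Nat) (memo : PySem.Dict Int Int), GoodMemo stair memo →
      GoodMemo stair (pvRun stair [.expand i] memo) ∧
      (∀ k : Int, memo.contains k = true → (pvRun stair [.expand i] memo).contains k = true) ∧
      (pvRun stair [.expand i] memo).contains ((i : Nat) : Int) = true := by
  intro i
  induction i using Nat.strong_induction_on with
  | _ i ih =>
    intro memo hg
    by_cases hc : memo.contains ((i : Nat) : Int)
    · rw [pvRun_expand_mem _ _ _ _ hc, pvRun_nil]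
      exact ⟨hg, fun k hk => hk, hc⟩
    · have hc' : memo.contains ((i : Nat) : Int) = false := by
        exact Bool.not_eq_true _ ▸ (by simpa using hc)
      by_cases hi : i ≤ 2
      · rw [pvRun_expand_base _ _ _ _ hc' hi, pvRun_nil]
        refine ⟨goodMemo_insert stair memo i hg _ rfl, ?_, ?_⟩
        · intro k hk
          rw [PySem.Dict.contains_insert]; simp [hk]
        · exact PySem.Dict.contains_insert_self _ _ _
      · -- i ≥ 3: push combine i, expand i-3, expand i-2 and recurse
        rw [pvRun_expand_push _ _ _ _ hc' hi]
        have hsplit : ([PvFrame.expand (i-2), PvFrame.expand (i-3), PvFrame.combine i] : List PvFrame)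
            = [PvFrame.expand (i-2)] ++ ([PvFrame.expand (i-3)] ++ [PvFrame.combine i]) := by rfl
        rw [hsplit,
            pvRun_append stair (pvMeas [PvFrame.expand (i-2)]) _ _ _ (le_refl _),
            pvRun_append stair (pvMeas [PvFrame.expand (i-3)]) _ _ _ (le_refl _)]
        set m1 := pvRun stair [.expand (i-2)] memo with hm1
        obtain ⟨hg1, hmono1, hc1⟩ := ih (i-2) (by omega) memo hg
        set m2 := pvRun stair [.expand (i-3)] m1 with hm2
        obtain ⟨hg2, hmono2, hc2⟩ := ih (i-3) (by omega) m1 hg1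
        rw [pvRun_combine, pvRun_nil]
        have hd3 : m2.getD (((i-3 : Nat) : Nat) : Int) 0 = bestFn stair (i-3) := hg2 _ hc2
        have hd2 : m2.getD (((i-2 : Nat) : Nat) : Int) 0 = bestFn stair (i-2) :=
          hg2 _ (hmono2 _ hc1)
        have hval : max (m2.getD ((i-3 : Nat) : Int) 0 + stair.getD (i-1) 0 + stair.getD i 0)
                        (m2.getD ((i-2 : Nat) : Int) 0 + stair.getD i 0) = bestFn stair i := by
          rw [hd3, hd2]
          obtain ⟨k, rfl⟩ : ∃ k, i = k + 3 := ⟨i - 3, by omega⟩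
          have e3 : k + 3 - 3 = k := by omega
          have e2 : k + 3 - 2 = k + 1 := by omega
          have e1 : k + 3 - 1 = k + 2 := by omega
          rw [e3, e2, e1]
          rfl
        refine ⟨goodMemo_insert stair m2 i hg2 _ hval, ?_, ?_⟩
        · intro k hk
          have hkm2 : m2.contains k = true := hmono2 _ (hmono1 _ hk)
          simp [PySem.Dict.contains_insert, hkm2]
        · exact PySem.Dict.contains_insert_self _ _ _

-- ===== VERDICT (by name: the statement is the Claim_ definition above) =====
theorem solution_spec : Claim_equal_solution := by
  intro n stair _ hpre
  obtain ⟨hn1, _⟩ := hpre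
  unfold Spec_solution solution solution_alt
  by_cases h1 : n = 1
  · simp [h1]
  · by_cases h2 : n = 2
    · simp [h2]
    · simp only [h1, h2, if_false]
      have hn3 : 3 ≤ n := by omega
      have hL : 3 ≤ n.toNat := by omega
      -- A's side computes bestFn (n-1)
      set c3 := (((List.replicate n.toNat (0:Int)).set 0 (stair.getD 0 0)).set 1
              (stair.getD 0 0 + stair.getD 1 0)).set 2
              (max (stair.getD 0 0 + stair.getD 2 0) (stair.getD 1 0 + stair.getD 2 0)) with hc3
      have hc3len : c3.length = n.toNat := by simp [hc3]
      have hinv := loop_inv stair c3 (by rw [hc3]; exact base_entries stair n.toNat hL) c3.length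
      have hidx : (n-1).toNat < c3.length := by omega
      rw [hinv.2 (n-1).toNat hidx (Or.inr hidx)]
      -- B's side: the stack machine memoizes bestFn at every key it contains, including n-1
      have hempty : GoodMemo stair PySem.Dict.empty := by
        intro j hj
        simp [PySem.Dict.contains_empty] at hj
      obtain ⟨hgood, _, hcont⟩ := expand_correct stair (n-1).toNat PySem.Dict.empty hempty
      have hkey : (((n-1).toNat : Nat) : Int) = n - 1 := by omega
      rw [← hkey]
      exact (hgood _ hcont).symm
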